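-- pv_equiv track=rewrite | github.com/SFshr/procedurally-generated-poetry | collapse.py | minentropy
-- ===== SOURCE A (Python) =====
-- def minentropy(entropylist):
--   minentropy = 10
--   minindex = []
--   for i,entropy in enumerate(entropylist):
--     if entropy != 0 and entropy < minentropy:
--       minentropy = entropy
--       minindex = [i]
--     elif entropy == minentropy:
--       minindex.append(i)
--   return minindex
-- ===== SOURCE B (Python) =====
-- def minentropy(entropylist):
--     nonzero = [e for e in entropylist if e != 0]
--     m = min(10, min(nonzero, default=10))
--     return [i for i, e in enumerate(entropylist) if e == m]
-- ===== Notes on version B (the rewrite author's own statement) =====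
-- stated objective: simpler
-- what changed: Replaces the stateful running-min-with-reset loop by a two-pass decomposition: first compute the target value m = min(10, min of nonzero entries, defaulting to 10), then filter the indices whose entry equals m.
import Mathlib
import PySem

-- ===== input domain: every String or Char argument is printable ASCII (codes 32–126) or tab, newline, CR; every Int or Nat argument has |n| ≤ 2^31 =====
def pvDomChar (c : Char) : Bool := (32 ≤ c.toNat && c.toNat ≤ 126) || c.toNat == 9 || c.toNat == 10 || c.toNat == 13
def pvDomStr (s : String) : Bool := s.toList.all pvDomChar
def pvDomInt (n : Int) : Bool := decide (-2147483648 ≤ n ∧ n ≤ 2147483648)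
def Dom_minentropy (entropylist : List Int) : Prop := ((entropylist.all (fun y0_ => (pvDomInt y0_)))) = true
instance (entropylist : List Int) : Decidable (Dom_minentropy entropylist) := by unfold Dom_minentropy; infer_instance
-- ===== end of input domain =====

-- B replaces A's stateful running-min-with-reset loop by two passes: compute m, then filter indices.

-- ===== PORT A =====
-- the for-loop over enumerate, carrying the running minimum `m`, the index list `idx`
-- and the current index `k`
def minentropyLoop (l : List Int) (k : Int) (m : Int) (idx : List Int) : List Int :=
  match l with
  | [] => idx
  | e :: rest =>
    if e ≠ 0 ∧ e < m then minentropyLoop rest (k + 1) e [k]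
    else if e = m then minentropyLoop rest (k + 1) m (idx ++ [k])
    else minentropyLoop rest (k + 1) m idx

def minentropy (entropylist : List Int) : List Int :=
  minentropyLoop entropylist 0 10 []

-- ===== PORT B =====
-- the comprehension [i for i, e in enumerate(l) if e == m], with index counter k
def collectEq (l : List Int) (k : Int) (m : Int) : List Int :=
  match l with
  | [] => []
  | e :: rest => if e = m then k :: collectEq rest (k + 1) m else collectEq rest (k + 1) m

def minentropy_alt (entropylist : List Int) : List Int :=
  let nonzero := entropylist.filter (fun e => e != 0)
  let m := min 10 (match nonzero with | [] => 10 | h :: t => t.foldl min h)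
  collectEq entropylist 0 m

-- ===== PRECONDITION & SPEC =====
def Spec_minentropy (entropylist : List Int) (out : List Int) : Prop := out = minentropy_alt entropylist
instance (entropylist : List Int) (out : List Int) : Decidable (Spec_minentropy entropylist out) := by unfold Spec_minentropy; infer_instance

-- ===== CLAIM (what is proved, stated in full; the proofs are below) =====
def Claim_equal_minentropy : Prop := ∀ (entropylist : List Int), Dom_minentropy entropylist → Spec_minentropy entropylist (minentropy entropylist)

-- ===== LEMMAS AND PROOFS =====

-- the final value of A's running minimum, as a standalone recursion
def mfin (l : List Int) (m : Int) : Int :=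
  match l with
  | [] => m
  | e :: rest => if e ≠ 0 ∧ e < m then mfin rest e else mfin rest m

theorem mfin_le (l : List Int) (m : Int) : mfin l m ≤ m := by
  induction l generalizing m with
  | nil => simp [mfin]
  | cons e rest ih =>
    simp only [mfin]
    split
    · exact le_trans (ih e) (le_of_lt (by omega))
    · exact ih m

theorem mfin_ne_zero (l : List Int) (m : Int) (hm : m ≠ 0) : mfin l m ≠ 0 := by
  induction l generalizing m with
  | nil => simpa [mfin]
  | cons e rest ih =>
    simp only [mfin]
    split
    · next h => exact ih e h.1
    · exact ih m hm

-- A's loop equals: keep idx iff the minimum never drops, then append B's filter at the final minimum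
theorem loop_eq (l : List Int) (k m : Int) (idx : List Int) (hm : m ≠ 0) :
    minentropyLoop l k m idx =
      (if mfin l m = m then idx else []) ++ collectEq l k (mfin l m) := by
  induction l generalizing k m idx with
  | nil => simp [minentropyLoop, mfin, collectEq]
  | cons e rest ih =>
    simp only [minentropyLoop, mfin, collectEq]
    by_cases h : e ≠ 0 ∧ e < m
    · have hlt : mfin rest e < m := lt_of_le_of_lt (mfin_le rest e) h.2
      simp only [if_pos h]
      rw [ih _ e [k] h.1]
      have hne : mfin rest e ≠ m := ne_of_lt hlt
      by_cases he : mfin rest e = e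
      · rw [he]
        simp [show e ≠ m from he ▸ hne]
      · have h2 : ¬ e = mfin rest e := fun hh => he hh.symm
        simp [hne, h2, he]
    · simp only [if_neg h]
      by_cases he : e = m
      · simp only [if_pos he]
        rw [ih _ m (idx ++ [k]) hm]
        by_cases hfix : mfin rest m = m
        · simp [hfix, he, List.append_assoc]
        · have : ¬ e = mfin rest m := by rw [he]; exact fun hh => hfix hh.symm
          simp [hfix, this]
      · simp only [if_neg he]
        rw [ih _ m idx hm]
        have : ¬ e = mfin rest m := by
          intro hh
          rcases (not_and_or.mp h) with h0 | hge
          · have h0' : e = 0 := by omega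
            exact mfin_ne_zero rest m hm (by rw [← hh, h0'])
          · have hge' : m ≤ e := by omega
            have hl := mfin_le rest m
            exact he (le_antisymm (by omega) (by omega))
        simp [this]

-- min-folding commutes with an outer min
theorem foldl_min_min (t : List Int) (a b : Int) :
    t.foldl min (min a b) = min a (t.foldl min b) := by
  induction t generalizing b with
  | nil => simp
  | cons x xs ih => simp [List.foldl, min_assoc, ih]

-- A's final minimum is the fold of min over the nonzero entries, started at m
theorem mfin_eq_foldl (l : List Int) (m : Int) :
    mfin l m = (l.filter (fun e => e != 0)).foldl min m := by
  induction l generalizing m with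
  | nil => simp [mfin]
  | cons e rest ih =>
    simp only [mfin, List.filter]
    by_cases h0 : e = 0
    · simp [h0, ih]
    · have hb : (e != 0) = true := by simpa using h0
      simp only [hb]
      by_cases hlt : e < m
      · have : min m e = e := by omega
        simp [h0, hlt, ih, List.foldl, this]
      · have : min m e = m := by omega
        simp [h0, hlt, ih, List.foldl, this]

-- B's m expression equals the same fold started at 10
theorem bmin_eq (l : List Int) :
    (min 10 (match l.filter (fun e => e != 0) with | [] => 10 | h :: t => t.foldl min h) : Int)
      = (l.filter (fun e => e != 0)).foldl min 10 := by
  cases hnz : l.filter (fun e => e != 0) with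
  | nil => simp
  | cons h t => simp [List.foldl, ← foldl_min_min]

-- ===== VERDICT (by name: the statement is the Claim_ definition above) =====
theorem minentropy_spec : Claim_equal_minentropy := by
  intro l _
  show minentropy l = minentropy_alt l
  show minentropyLoop l 0 10 [] =
    collectEq l 0 (min 10 (match l.filter (fun e => e != 0) with | [] => 10 | h :: t => t.foldl min h))
  rw [loop_eq l 0 10 [] (by norm_num), bmin_eq, ← mfin_eq_foldl]
  simp
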